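-- pv_equiv track=rewrite | github.com/cmplx-xyttmt/competitive-programming | python/src/codeforces/CF966/F.py | get_minimum_operations
-- ===== SOURCE A (Python) =====
-- def get_minimum_operations(k, a, b):
--     ops = 0
--     for _ in range(k):
--         if a < b:
--             ops += a
--             b -= 1
--         else:
--             ops += b
--             a -= 1
--     return ops
-- ===== SOURCE B (Python) =====
-- def get_minimum_operations(k, a, b):
--     # O(1): batch the constant-addend phase, then closed form for the balanced region
--     if k <= 0:
--         return 0
--     ops = 0
--     if a != b:
--         s = min(k, abs(a - b))
--         ops += s * min(a, b)
--         k -= s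
--     m = min(a, b)
--     h = k // 2
--     return ops + m * k - h * (k - h)
-- ===== Notes on version B (the rewrite author's own statement) =====
-- stated objective: faster
-- what changed: Replaces the O(k) step-by-step simulation with O(1) arithmetic: the unbalanced phase (constant min added while the larger value shrinks) is batched as one multiplication, and the balanced tail is an arithmetic-series closed form using k//2.
import Mathlib
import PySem

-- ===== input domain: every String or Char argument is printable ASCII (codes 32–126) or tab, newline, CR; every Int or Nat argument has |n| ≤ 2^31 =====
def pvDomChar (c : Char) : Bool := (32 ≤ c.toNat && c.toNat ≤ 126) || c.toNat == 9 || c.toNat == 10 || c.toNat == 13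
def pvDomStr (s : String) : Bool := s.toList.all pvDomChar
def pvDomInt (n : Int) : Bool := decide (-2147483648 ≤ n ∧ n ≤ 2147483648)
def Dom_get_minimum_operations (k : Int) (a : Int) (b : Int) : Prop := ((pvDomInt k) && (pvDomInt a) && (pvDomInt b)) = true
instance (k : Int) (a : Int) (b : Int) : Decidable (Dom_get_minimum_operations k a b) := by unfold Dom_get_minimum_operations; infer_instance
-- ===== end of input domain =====

-- B replaces A's O(k) step-by-step loop by O(1) arithmetic: one batched constant-addend
-- phase plus a closed form for the balanced region.

-- ===== PORT A =====
-- the 'for _ in range(k)' loop over state (ops, a, b)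
def pvLoopA : Nat → Int → Int → Int → Int
  | 0, ops, _, _ => ops
  | n + 1, ops, a, b =>
      if a < b then pvLoopA n (ops + a) a (b - 1)
      else pvLoopA n (ops + b) (a - 1) b

def get_minimum_operations (k : Int) (a : Int) (b : Int) : Int :=
  pvLoopA k.toNat 0 a b

-- ===== PORT B =====
def get_minimum_operations_alt (k : Int) (a : Int) (b : Int) : Int :=
  if k ≤ 0 then 0
  else
    let p : Int × Int :=
      if a ≠ b then
        let s := min k |a - b|
        (s * min a b, k - s)
      else (0, k)
    let m := min a b
    let h := PySem.Int.floordiv p.2 2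
    p.1 + m * p.2 - h * (p.2 - h)

-- ===== PRECONDITION & SPEC =====
def Spec_get_minimum_operations (k : Int) (a : Int) (b : Int) (out : Int) : Prop := out = get_minimum_operations_alt k a b
instance (k : Int) (a : Int) (b : Int) (out : Int) : Decidable (Spec_get_minimum_operations k a b out) := by unfold Spec_get_minimum_operations; infer_instance

-- ===== CLAIM (what is proved, stated in full; the proofs are below) =====
def Claim_equal_get_minimum_operations : Prop := ∀ (k : Int) (a : Int) (b : Int), Dom_get_minimum_operations k a b → Spec_get_minimum_operations k a b (get_minimum_operations k a b)

-- ===== LEMMAS AND PROOFS =====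

-- pulling the accumulator out of the loop
lemma pvLoopA_shift (n : Nat) : ∀ (ops a b : Int),
    pvLoopA n ops a b = ops + pvLoopA n 0 a b := by
  induction n with
  | zero => intro ops a b; simp [pvLoopA]
  | succ n ih =>
      intro ops a b
      by_cases h : a < b
      · simp only [pvLoopA, if_pos h]; rw [ih (ops + a), ih (0 + a)]; ring
      · simp only [pvLoopA, if_neg h]; rw [ih (ops + b), ih (0 + b)]; ring

-- the balanced region: starting from a = b = m, n steps add m, m-1, m-1, m-2, m-2, …
lemma pvLoopA_eq (n : Nat) : ∀ (m : Int),
    pvLoopA n 0 m m = m * n - (n / 2 : Nat) * ((n : Int) - (n / 2 : Nat)) := by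
  induction n using Nat.strong_induction_on with
  | _ n ih =>
    intro m
    match n with
    | 0 => simp [pvLoopA]
    | 1 => simp [pvLoopA]
    | (n + 2) =>
      have h1 : ¬ (m < m) := lt_irrefl m
      have h2 : m - 1 < m := by omega
      have e : pvLoopA (n + 2) 0 m m
          = (0 + m) + ((m - 1) + pvLoopA n 0 (m - 1) (m - 1)) := by
        simp only [pvLoopA, if_neg h1, if_pos h2]
        rw [pvLoopA_shift n]
        ring
      rw [e, ih n (by omega) (m - 1)]
      have hq : ((n + 2) / 2 : Nat) = (n / 2 : Nat) + 1 := by omega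
      rw [hq]
      push_cast
      ring

-- unbalanced phase, a < b: each step adds a and decrements b until balance or fuel runs out
lemma pvLoopA_lt (d : Nat) : ∀ (n : Nat) (a : Int),
    pvLoopA n 0 a (a + d) = (min n d : Nat) * a + pvLoopA (n - min n d) 0 a a := by
  induction d with
  | zero => intro n a; simp
  | succ d ih =>
      intro n a
      match n with
      | 0 => simp [pvLoopA]
      | (n + 1) =>
        have hlt : a < a + ((d : Int) + 1) := by omega
        have e : pvLoopA (n + 1) 0 a (a + ((d : Nat) + 1 : Nat)) = a + pvLoopA n 0 a (a + d) := by
          push_cast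
          simp only [pvLoopA, if_pos hlt]
          rw [pvLoopA_shift n]
          have : a + ((d : Int) + 1) - 1 = a + d := by ring
          rw [this]; ring
        rw [e, ih n a]
        have hm : (min (n + 1) (d + 1) : Nat) = min n d + 1 := by omega
        have hs : n + 1 - (min n d + 1) = n - min n d := by omega
        rw [hm, hs]
        push_cast
        ring

-- unbalanced phase, a > b: each step adds b and decrements a until balance or fuel runs out
lemma pvLoopA_gt (d : Nat) : ∀ (n : Nat) (b : Int),
    pvLoopA n 0 (b + d) b = (min n d : Nat) * b + pvLoopA (n - min n d) 0 b b := by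
  induction d with
  | zero => intro n b; simp
  | succ d ih =>
      intro n b
      match n with
      | 0 => simp [pvLoopA]
      | (n + 1) =>
        have hnlt : ¬ (b + ((d : Int) + 1) < b) := by omega
        have e : pvLoopA (n + 1) 0 (b + ((d : Nat) + 1 : Nat)) b = b + pvLoopA n 0 (b + d) b := by
          push_cast
          simp only [pvLoopA, if_neg hnlt]
          rw [pvLoopA_shift n]
          have : b + ((d : Int) + 1) - 1 = b + d := by ring
          rw [this]; ring
        rw [e, ih n b]
        have hm : (min (n + 1) (d + 1) : Nat) = min n d + 1 := by omega
        have hs : n + 1 - (min n d + 1) = n - min n d := by omega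
        rw [hm, hs]
        push_cast
        ring

lemma floordiv_half (r : Nat) (k : Int) (h : (r : Int) = k) :
    ((r / 2 : Nat) : Int) = PySem.Int.floordiv k 2 := by
  rw [← h]
  exact_mod_cast (PySem.Int.floordiv_natCast r 2).symm

-- ===== VERDICT (by name: the statement is the Claim_ definition above) =====
theorem get_minimum_operations_spec : Claim_equal_get_minimum_operations := by
  intro k a b _
  unfold Spec_get_minimum_operations get_minimum_operations get_minimum_operations_alt
  by_cases hk : k ≤ 0
  · have : k.toNat = 0 := by omega
    simp [this, pvLoopA, hk]
  · rw [if_neg hk]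
    have hkn : ((k.toNat : Nat) : Int) = k := by omega
    rcases lt_trichotomy a b with hab | hab | hab
    · -- a < b
      obtain ⟨d, hd⟩ : ∃ d : Nat, b = a + d := ⟨(b - a).toNat, by omega⟩
      subst hd
      have hne : a ≠ a + (d : Int) := by omega
      have habs : |a - (a + (d : Int))| = (d : Int) := by
        rw [abs_sub_comm, abs_of_nonneg (by omega : (0:Int) ≤ a + (d : Int) - a)]; ring
      have hmin : min a (a + (d : Int)) = a := min_eq_left (by omega)
      simp only [if_pos hne, habs, hmin]
      rw [pvLoopA_lt d k.toNat a, pvLoopA_eq]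
      have hs : ((min k.toNat d : Nat) : Int) = min k (d : Int) := by omega
      have hr : ((k.toNat - min k.toNat d : Nat) : Int) = k - min k (d : Int) := by omega
      rw [floordiv_half _ _ hr, hs, hr]
      ring
    · -- a = b
      simp only [hab, ne_eq, not_true_eq_false, if_false, min_self]
      rw [pvLoopA_eq, floordiv_half _ _ hkn, hkn]
      ring
    · -- a > b
      obtain ⟨d, hd⟩ : ∃ d : Nat, a = b + d := ⟨(a - b).toNat, by omega⟩
      subst hd
      have hne : b + (d : Int) ≠ b := by omega
      have habs : |b + (d : Int) - b| = (d : Int) := by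
        rw [abs_of_nonneg (by omega : (0:Int) ≤ b + (d : Int) - b)]; ring
      have hmin : min (b + (d : Int)) b = b := min_eq_right (by omega)
      simp only [if_pos hne, habs, hmin]
      rw [pvLoopA_gt d k.toNat b, pvLoopA_eq]
      have hs : ((min k.toNat d : Nat) : Int) = min k (d : Int) := by omega
      have hr : ((k.toNat - min k.toNat d : Nat) : Int) = k - min k (d : Int) := by omega
      rw [floordiv_half _ _ hr, hs, hr]
      ring
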